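-- pv_equiv track=rewrite | github.com/V0ID11/SchoolWorkNickG | PreReleaseCode/wordswithAQA copy.py | CheckWordIsInTiles
-- ===== SOURCE A (Python) =====
-- def CheckWordIsInTiles(Word, PlayerTiles):
--   InTiles = True
--   CopyOfTiles = PlayerTiles
--   for Count in range(len(Word)):
--     if Word[Count] in CopyOfTiles:
--       CopyOfTiles = CopyOfTiles.replace(Word[Count], "", 1)
--     else:
--       InTiles = False
--   return InTiles
-- ===== SOURCE B (Python) =====
-- def CheckWordIsInTiles(Word, PlayerTiles):
--   need = {}
--   for ch in Word:
--     need[ch] = need.get(ch, 0) + 1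
--   avail = {}
--   for ch in PlayerTiles:
--     avail[ch] = avail.get(ch, 0) + 1
--   for ch in need:
--     if need[ch] > avail.get(ch, 0):
--       return False
--   return True
-- ===== Notes on version B (the rewrite author's own statement) =====
-- stated objective: faster
-- what changed: Replaces A's destructive scan that deletes one tile per matched letter from a running copy of the tile string (each membership test and replace rescans the pool) with two letter-frequency tables built in separate passes and a final per-distinct-letter count comparison.
import Mathlib
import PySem

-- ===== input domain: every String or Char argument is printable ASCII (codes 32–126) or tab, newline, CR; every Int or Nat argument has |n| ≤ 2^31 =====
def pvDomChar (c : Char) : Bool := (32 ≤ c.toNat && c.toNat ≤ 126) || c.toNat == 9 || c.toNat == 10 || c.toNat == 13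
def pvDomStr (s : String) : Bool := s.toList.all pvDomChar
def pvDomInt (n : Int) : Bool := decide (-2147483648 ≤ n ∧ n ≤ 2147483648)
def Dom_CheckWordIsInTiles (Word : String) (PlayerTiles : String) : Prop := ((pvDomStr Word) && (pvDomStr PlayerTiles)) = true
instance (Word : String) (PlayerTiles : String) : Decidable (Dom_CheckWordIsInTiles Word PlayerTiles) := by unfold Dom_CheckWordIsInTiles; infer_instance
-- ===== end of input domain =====

-- B replaces A's destructive scan-and-decrement of a copied tile pool by two
-- letter-frequency tables compared per distinct letter (alternative decomposition).


-- ===== PORT A =====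
-- A's loop: scan Word left to right; if the letter is in the remaining copy of the
-- tiles, delete its first occurrence ('replace(c, "", 1)' = List.erase), else set the
-- flag false and keep going.
def pvLoopA : List Char → List Char → Bool → Bool
  | [], _, inTiles => inTiles
  | c :: rest, copy, inTiles =>
    if c ∈ copy then pvLoopA rest (copy.erase c) inTiles
    else pvLoopA rest copy false

def CheckWordIsInTiles (Word : String) (PlayerTiles : String) : Bool :=
  pvLoopA Word.toList PlayerTiles.toList true

-- ===== PORT B =====
def CheckWordIsInTiles_alt (Word : String) (PlayerTiles : String) : Bool :=
  let need := Word.toList.foldl (fun d ch => d.insert ch (d.getD ch 0 + 1)) (PySem.Dict.empty : PySem.Dict Char Int)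
  let avail := PlayerTiles.toList.foldl (fun d ch => d.insert ch (d.getD ch 0 + 1)) (PySem.Dict.empty : PySem.Dict Char Int)
  need.keys.all (fun ch => !decide (need.getD ch 0 > avail.getD ch 0))

-- ===== PRECONDITION & SPEC =====
def Spec_CheckWordIsInTiles (Word : String) (PlayerTiles : String) (out : Bool) : Prop := out = CheckWordIsInTiles_alt Word PlayerTiles
instance (Word : String) (PlayerTiles : String) (out : Bool) : Decidable (Spec_CheckWordIsInTiles Word PlayerTiles out) := by unfold Spec_CheckWordIsInTiles; infer_instance

-- ===== CLAIM (what is proved, stated in full; the proofs are below) =====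
def Claim_equal_CheckWordIsInTiles : Prop := ∀ (Word : String) (PlayerTiles : String), Dom_CheckWordIsInTiles Word PlayerTiles → Spec_CheckWordIsInTiles Word PlayerTiles (CheckWordIsInTiles Word PlayerTiles)

-- ===== LEMMAS AND PROOFS =====

theorem pvLoopA_eq (ws pool : List Char) (b : Bool) :
    pvLoopA ws pool b = (b && decide (∀ c ∈ ws, ws.count c ≤ pool.count c)) := by
  induction ws generalizing pool b with
  | nil => simp [pvLoopA]
  | cons c rest ih =>
    by_cases h : c ∈ pool
    · have hpc : 1 ≤ pool.count c := List.one_le_count_iff.mpr h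
      have hcount_e : ∀ e : Char, (pool.erase c).count e = pool.count e - if c = e then 1 else 0 :=
        fun e => by simp [List.count_erase]
      have hcons : ∀ e : Char, (c :: rest).count e = rest.count e + if c = e then 1 else 0 :=
        fun e => by simp [List.count_cons]
      have key : (∀ d ∈ rest, rest.count d ≤ (pool.erase c).count d) ↔
          (∀ d ∈ c :: rest, (c :: rest).count d ≤ pool.count d) := by
        constructor
        · intro H d hd
          rw [hcons]
          rcases List.mem_cons.mp hd with rfl | hd'
          · rcases em (d ∈ rest) with hc | hc
            · have hH := H d hc
              rw [hcount_e] at hH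
              simp at hH ⊢
              omega
            · have h0 : rest.count d = 0 := List.count_eq_zero_of_not_mem hc
              simp [h0]
              omega
          · have hH := H d hd'
            rw [hcount_e] at hH
            by_cases hdc : c = d
            · subst hdc
              simp at hH ⊢
              omega
            · simp [hdc] at hH ⊢
              omega
        · intro H d hd
          have hH := H d (List.mem_cons_of_mem _ hd)
          rw [hcons] at hH
          rw [hcount_e]
          by_cases hdc : c = d
          · subst hdc
            simp at hH ⊢
            omega
          · simp [hdc] at hH ⊢
            omega
      rw [pvLoopA, if_pos h, ih, decide_eq_decide.mpr key]
    · rw [pvLoopA, if_neg h, ih]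
      have hnot : ¬ (∀ d ∈ c :: rest, (c :: rest).count d ≤ pool.count d) := by
        intro H
        have h1 := H c List.mem_cons_self
        have h2 : pool.count c = 0 := List.count_eq_zero_of_not_mem h
        rw [List.count_cons_self, h2] at h1
        omega
      rw [decide_eq_false hnot]
      simp

theorem alt_eq (Word PlayerTiles : String) :
    CheckWordIsInTiles_alt Word PlayerTiles
      = decide (∀ c ∈ Word.toList, Word.toList.count c ≤ PlayerTiles.toList.count c) := by
  unfold CheckWordIsInTiles_alt
  rw [PySem.Dict.foldl_insert_getD_add_one_eq_counter, PySem.Dict.foldl_insert_getD_add_one_eq_counter]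
  simp only [PySem.Dict.keys_counter, PySem.Dict.getD_counter]
  rcases hb : decide (∀ c ∈ Word.toList, Word.toList.count c ≤ PlayerTiles.toList.count c) with _ | _
  · simp only [decide_eq_false_iff_not] at hb
    push Not at hb
    obtain ⟨c, hc, hlt⟩ := hb
    apply List.all_eq_false.mpr
    refine ⟨c, ?_, ?_⟩
    · exact (PySem.Set.mem_ofList _ _).mpr hc
    · simp
      exact_mod_cast hlt
  · simp only [decide_eq_true_eq] at hb
    apply List.all_eq_true.mpr
    intro c hc
    have hc' := (PySem.Set.mem_ofList _ _).mp hc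
    simp
    exact_mod_cast hb c hc'

-- ===== VERDICT (by name: the statement is the Claim_ definition above) =====
theorem CheckWordIsInTiles_spec : Claim_equal_CheckWordIsInTiles := by
  intro Word PlayerTiles _
  unfold Spec_CheckWordIsInTiles CheckWordIsInTiles
  rw [pvLoopA_eq, alt_eq]
  simp
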